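-- pv_equiv track=rewrite | github.com/qiuuuuu622/EasyR1-async | verl/trainer/ray_trainer/training_async_runtime.py | _strip_prompt_overlap
-- ===== SOURCE A (Python) =====
-- from typing import TYPE_CHECKING, Any, Dict, List, Optional, Set
--
-- def _strip_prompt_overlap(output_ids: List[int], prompt_ids: List[int]) -> List[int]:
--     """去除 output 中与 prompt 重叠的部分。"""
--     if not output_ids or not prompt_ids:
--         return output_ids
--
--     max_overlap = min(len(output_ids), len(prompt_ids))
--     for overlap in range(max_overlap, 0, -1):
--         if prompt_ids[-overlap:] == output_ids[:overlap]:
--             return output_ids[overlap:]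
--     return output_ids
-- ===== SOURCE B (Python) =====
-- def _strip_prompt_overlap(output_ids, prompt_ids):
--     """KMP prefix-function over output + [sentinel] + prompt: the final prefix-function
--     value is the longest output-prefix equal to a prompt-suffix; drop it. O(n) time."""
--     if not output_ids or not prompt_ids:
--         return output_ids
--     s = output_ids + [None] + prompt_ids
--     pi = [0] * len(s)
--     k = 0
--     for i in range(1, len(s)):
--         c = s[i]
--         while k > 0 and c != s[k]:
--             k = pi[k - 1]
--         if c == s[k]:
--             k += 1
--         pi[i] = k
--     return output_ids[k:]
-- ===== Notes on version B (the rewrite author's own statement) =====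
-- stated objective: faster
-- what changed: Replaced the descending brute-force scan over all overlap lengths (each testing two fresh slices) by a single KMP prefix-function pass over output + [sentinel] + prompt whose final value is the longest output-prefix equal to a prompt-suffix.
import Mathlib
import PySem

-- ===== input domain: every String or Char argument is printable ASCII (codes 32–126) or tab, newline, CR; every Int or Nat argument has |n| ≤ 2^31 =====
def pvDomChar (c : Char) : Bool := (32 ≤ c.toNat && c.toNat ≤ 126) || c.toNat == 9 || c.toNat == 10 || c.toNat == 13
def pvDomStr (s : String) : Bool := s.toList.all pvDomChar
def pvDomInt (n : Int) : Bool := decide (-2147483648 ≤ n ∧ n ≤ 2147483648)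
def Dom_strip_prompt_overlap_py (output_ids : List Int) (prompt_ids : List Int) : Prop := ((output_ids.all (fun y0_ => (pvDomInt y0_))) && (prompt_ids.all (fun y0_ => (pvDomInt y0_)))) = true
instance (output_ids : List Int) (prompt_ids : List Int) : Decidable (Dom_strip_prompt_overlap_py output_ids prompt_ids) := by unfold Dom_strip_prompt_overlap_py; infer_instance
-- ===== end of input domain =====

-- B replaces A's descending brute-force scan over overlap lengths (O(n^2)) by one KMP
-- prefix-function pass over output ++ [sentinel] ++ prompt (objective: faster).

-- ===== PORT A =====
-- for overlap in range(max_overlap, 0, -1): if prompt_ids[-overlap:] == output_ids[:overlap]: return output_ids[overlap:]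
def stripLoopA (output_ids prompt_ids : List Int) : List Int → List Int
  | [] => output_ids
  | ov :: rest =>
    if PySem.List.slice prompt_ids (some (-ov)) none = PySem.List.slice output_ids none (some ov) then
      PySem.List.slice output_ids (some ov) none
    else stripLoopA output_ids prompt_ids rest

def strip_prompt_overlap_py (output_ids : List Int) (prompt_ids : List Int) : List Int :=
  if output_ids = [] ∨ prompt_ids = [] then output_ids
  else
    let max_overlap : Int := min (output_ids.length : Int) (prompt_ids.length : Int)
    stripLoopA output_ids prompt_ids (PySem.List.pyRange max_overlap 0 (-1))

-- ===== PORT B =====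
-- the inner `while k > 0 and c != s[k]: k = pi[k-1]` of Source B; fuel-bounded to make the
-- recursion structural (fuel := k suffices: pi[j] ≤ j, so k strictly decreases)
def kmpFall (s : List (Option Int)) (pi : List Nat) (c : Option Int) : Nat → Nat → Nat
  | 0, k => k
  | fuel + 1, k =>
    if k ≠ 0 ∧ c ≠ s.getD k none then kmpFall s pi c fuel (pi.getD (k - 1) 0) else k

-- body of Source B's `for i in range(1, len(s))` loop: fall, extend on match, record pi[i]
def kmpStep (s : List (Option Int)) (st : List Nat × Nat) (i : Nat) : List Nat × Nat :=
  let c := s.getD i none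
  let k1 := kmpFall s st.1 c st.2 st.2
  let k2 := if c = s.getD k1 none then k1 + 1 else k1
  (st.1.set i k2, k2)

-- Source B: prefix-function pass over s = output_ids + [None] + prompt_ids (None ↦ none sentinel)
def strip_prompt_overlap_py_alt (output_ids : List Int) (prompt_ids : List Int) : List Int :=
  if output_ids = [] ∨ prompt_ids = [] then output_ids
  else
    let s : List (Option Int) := output_ids.map some ++ none :: prompt_ids.map some
    let st := (List.range' 1 (s.length - 1)).foldl (kmpStep s) (List.replicate s.length 0, 0)
    output_ids.drop st.2

-- ===== PRECONDITION & SPEC =====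
def Spec_strip_prompt_overlap_py (output_ids : List Int) (prompt_ids : List Int) (out : List Int) : Prop := out = strip_prompt_overlap_py_alt output_ids prompt_ids
instance (output_ids : List Int) (prompt_ids : List Int) (out : List Int) : Decidable (Spec_strip_prompt_overlap_py output_ids prompt_ids out) := by unfold Spec_strip_prompt_overlap_py; infer_instance

-- ===== CLAIM (what is proved, stated in full; the proofs are below) =====
def Claim_equal_strip_prompt_overlap_py : Prop := ∀ (output_ids : List Int) (prompt_ids : List Int), Dom_strip_prompt_overlap_py output_ids prompt_ids → Spec_strip_prompt_overlap_py output_ids prompt_ids (strip_prompt_overlap_py output_ids prompt_ids)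

-- ===== LEMMAS AND PROOFS =====

-- `borderb s k`: k is a proper border of s (a length-k prefix equal to the length-k suffix, k < |s|)
def borderb (s : List (Option Int)) (k : Nat) : Bool :=
  decide (k < s.length) && decide (s.take k = s.drop (s.length - k))

-- π(s): the longest proper border of s
def piSpec (s : List (Option Int)) : Nat :=
  Nat.findGreatest (fun k => borderb s k = true) (s.length - 1)

-- overlap predicate on the original Int lists, and the largest overlap
def ovb (o p : List Int) (k : Nat) : Bool := decide (o.take k = p.drop (p.length - k))

def maxOv (o p : List Int) : Nat :=
  Nat.findGreatest (fun k => ovb o p k = true) (min o.length p.length)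

theorem borderb_iff (s : List (Option Int)) (k : Nat) :
    borderb s k = true ↔ k < s.length ∧ s.take k = s.drop (s.length - k) := by
  simp [borderb]

theorem borderb_zero (s : List (Option Int)) (h : s ≠ []) : borderb s 0 = true := by
  rw [borderb_iff]
  exact ⟨List.length_pos_iff.mpr h, by simp⟩

theorem borderb_snoc (s : List (Option Int)) (c : Option Int) (k : Nat) :
    borderb (s ++ [c]) (k + 1) = true ↔ borderb s k = true ∧ s.getD k none = c := by
  rw [borderb_iff, borderb_iff]
  constructor
  · rintro ⟨hlen, heq⟩
    simp only [List.length_append, List.length_cons, List.length_nil] at hlen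
    have hk : k < s.length := by omega
    rw [List.take_append_of_le_length (by omega)] at heq
    simp only [List.length_append, List.length_cons, List.length_nil] at heq
    rw [show s.length + 1 - (k+1) = s.length - k by omega] at heq
    rw [List.drop_append_of_le_length (by omega)] at heq
    rw [List.take_add_one] at heq
    have hget : s[k]? = some s[k] := List.getElem?_eq_getElem hk
    rw [hget] at heq
    simp only [Option.toList_some] at heq
    have h2 := List.append_inj heq (by simp [List.length_take, List.length_drop]; omega)
    refine ⟨⟨hk, h2.1⟩, ?_⟩
    have := h2.2; simp at this
    rw [List.getD_eq_getElem _ _ hk]; exact this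
  · rintro ⟨⟨hk, heq⟩, hc⟩
    refine ⟨by simp; omega, ?_⟩
    rw [List.take_append_of_le_length (by omega), List.take_add_one]
    have hget : s[k]? = some s[k] := List.getElem?_eq_getElem hk
    rw [hget]
    simp only [List.length_append, List.length_cons, List.length_nil]
    rw [show s.length + 1 - (k+1) = s.length - k by omega,
      List.drop_append_of_le_length (by omega)]
    rw [List.getD_eq_getElem _ _ hk] at hc
    simp [heq, hc]
theorem border_take_of (s : List (Option Int)) (j k : Nat)
    (hk : borderb s k = true) (hj : borderb s j = true) (hjk : j < k) :
    borderb (s.take k) j = true := by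
  rw [borderb_iff] at *
  obtain ⟨hk1, hk2⟩ := hk
  obtain ⟨hj1, hj2⟩ := hj
  refine ⟨by simp [List.length_take]; omega, ?_⟩
  rw [List.take_take, min_eq_left (by omega)]
  rw [List.length_take, min_eq_left (by omega)]
  rw [hk2, List.drop_drop]
  rw [show s.length - k + (k - j) = s.length - j by omega]
  exact hj2
theorem border_of_take (s : List (Option Int)) (j k : Nat)
    (hk : borderb s k = true) (hj : borderb (s.take k) j = true) :
    borderb s j = true := by
  rw [borderb_iff] at *
  obtain ⟨hk1, hk2⟩ := hk
  obtain ⟨hj1, hj2⟩ := hj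
  rw [List.length_take, min_eq_left (by omega)] at hj1 hj2
  refine ⟨by omega, ?_⟩
  rw [List.take_take, min_eq_left (by omega)] at hj2
  rw [hj2, hk2, List.drop_drop]
  congr 1; omega
theorem piSpec_border (s : List (Option Int)) (h : s ≠ []) : borderb s (piSpec s) = true := by
  unfold piSpec
  exact Nat.findGreatest_spec (P := fun k => borderb s k = true) (Nat.zero_le _) (borderb_zero s h)

theorem le_piSpec (s : List (Option Int)) (k : Nat) (hk : borderb s k = true) : k ≤ piSpec s := by
  unfold piSpec
  exact Nat.le_findGreatest (by have := (borderb_iff s k).mp hk; omega) hk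

theorem piSpec_lt (s : List (Option Int)) (h : s ≠ []) : piSpec s < s.length :=
  ((borderb_iff s _).mp (piSpec_border s h)).1

theorem getD_take_eq (s : List (Option Int)) (i k : Nat) (h : k < (s.take i).length) :
    (s.take i).getD k none = s.getD k none := by
  rw [List.getD_eq_getElem _ _ h, List.getD_eq_getElem _ _ (by simp at h; omega)]
  simp

-- the fall loop finds the largest border j of t = s.take i with t[j] = c (or 0)
theorem kmpFall_spec (s : List (Option Int)) (pi : List Nat) (c : Option Int) (i : Nat)
    (hi : i ≤ s.length)
    (hpi : ∀ j, j + 1 ≤ i → pi.getD j 0 = piSpec (s.take (j + 1))) :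
    ∀ fuel k, k ≤ fuel → borderb (s.take i) k = true →
      (∀ j, borderb (s.take i) j = true → (s.take i).getD j none = c → j ≤ k) →
      borderb (s.take i) (kmpFall s pi c fuel k) = true ∧
      (∀ j, borderb (s.take i) j = true → (s.take i).getD j none = c →
        j ≤ kmpFall s pi c fuel k) ∧
      (kmpFall s pi c fuel k ≠ 0 → (s.take i).getD (kmpFall s pi c fuel k) none = c) := by
  intro fuel
  induction fuel with
  | zero =>
    intro k hk hb hmax
    interval_cases k
    rw [kmpFall]
    exact ⟨hb, hmax, by simp⟩
  | succ fuel ih =>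
    intro k hk hb hmax
    rw [kmpFall]
    split_ifs with h
    · -- k ≠ 0 and c ≠ s[k]
      obtain ⟨hk0, hcne⟩ := h
      have htlen : (s.take i).length = i := by simp [List.length_take]; omega
      have hklt : k < i := by
        have := ((borderb_iff _ _).mp hb).1; omega
      have hk1 : pi.getD (k - 1) 0 = piSpec (s.take k) := by
        have := hpi (k - 1) (by omega)
        rwa [show k - 1 + 1 = k by omega] at this
      have htk : s.take k = (s.take i).take k := by
        rw [List.take_take, min_eq_left (by omega)]
      have htknil : s.take k ≠ [] := by
        have : (s.take k).length = k := by simp [List.length_take]; omega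
        intro hnil; rw [hnil] at this; simp at this; omega
      have hbk' : borderb (s.take k) (piSpec (s.take k)) = true := piSpec_border _ htknil
      have hk'lt : piSpec (s.take k) < k := by
        have := piSpec_lt _ htknil
        have hlen : (s.take k).length = k := by simp [List.length_take]; omega
        omega
      rw [hk1]
      apply ih
      · omega
      · have hbk2 : borderb ((s.take i).take k) (piSpec (s.take k)) = true := by
          rw [← htk]; exact hbk'
        exact border_of_take _ _ _ hb hbk2
      · intro j hbj hcj
        have hjk : j ≤ k := hmax j hbj hcj
        have hjne : j ≠ k := by
          intro heq
          rw [heq] at hcj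
          rw [getD_take_eq s i k (by omega)] at hcj
          exact hcne hcj.symm
        have : borderb ((s.take i).take k) j = true :=
          border_take_of _ _ _ hb hbj (by omega)
        rw [← htk] at this
        exact le_piSpec _ _ this
    · -- exit: k = 0 or c = s[k]
      refine ⟨hb, hmax, ?_⟩
      intro hk0
      have hklt : k < (s.take i).length := ((borderb_iff _ _).mp hb).1
      rw [getD_take_eq s i k hklt]
      push Not at h
      exact (h hk0).symm

-- one iteration of the main loop advances π to the extended prefix
theorem kmp_step (s : List (Option Int)) (pi : List Nat) (c : Option Int) (i : Nat)
    (hi0 : 1 ≤ i) (hi : i ≤ s.length)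
    (hpi : ∀ j, j + 1 ≤ i → pi.getD j 0 = piSpec (s.take (j + 1))) :
    (let k1 := kmpFall s pi c (piSpec (s.take i)) (piSpec (s.take i));
     if c = s.getD k1 none then k1 + 1 else k1) = piSpec (s.take i ++ [c]) := by
  have htlen : (s.take i).length = i := by simp [List.length_take]; omega
  have htnil : s.take i ≠ [] := by
    intro hnil; rw [hnil] at htlen; simp at htlen; omega
  have hb0 : borderb (s.take i) (piSpec (s.take i)) = true := piSpec_border _ htnil
  obtain ⟨hbr, hmax, hne⟩ :=
    kmpFall_spec s pi c i hi hpi (piSpec (s.take i)) (piSpec (s.take i)) le_rfl hb0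
      (fun j hbj _ => le_piSpec _ _ hbj)
  set r := kmpFall s pi c (piSpec (s.take i)) (piSpec (s.take i)) with hrdef
  have hrlt : r < (s.take i).length := ((borderb_iff _ _).mp hbr).1
  have hgetr : s.getD r none = (s.take i).getD r none := (getD_take_eq s i r hrlt).symm
  have hsnil : s.take i ++ [c] ≠ [] := by simp
  simp only [hgetr]
  split_ifs with hc
  · -- c matches: answer r + 1
    have hb1 : borderb (s.take i ++ [c]) (r + 1) = true :=
      (borderb_snoc _ _ _).mpr ⟨hbr, hc.symm⟩
    have hle : r + 1 ≤ piSpec (s.take i ++ [c]) := le_piSpec _ _ hb1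
    have hge : piSpec (s.take i ++ [c]) ≤ r + 1 := by
      have hbm := piSpec_border _ hsnil
      cases hm : piSpec (s.take i ++ [c]) with
      | zero => omega
      | succ j =>
        rw [hm] at hbm
        obtain ⟨hbj, hcj⟩ := (borderb_snoc _ _ _).mp hbm
        have := hmax j hbj hcj
        omega
    omega
  · -- no match: r must be 0 and the extended prefix has no positive border
    have hr0 : r = 0 := by
      by_contra hne0
      exact hc (hne hne0).symm
    have hps : piSpec (s.take i ++ [c]) = 0 := by
      have hbm := piSpec_border _ hsnil
      cases hm : piSpec (s.take i ++ [c]) with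
      | zero => rfl
      | succ j =>
        rw [hm] at hbm
        obtain ⟨hbj, hcj⟩ := (borderb_snoc _ _ _).mp hbm
        have hj := hmax j hbj hcj
        rw [hr0] at hj
        interval_cases j
        rw [hr0] at hc
        exact absurd hcj.symm hc
    omega

-- full loop invariant
theorem piSpec_one (t : List (Option Int)) (h : t.length = 1) : piSpec t = 0 := by
  unfold piSpec
  rw [h]
  simp [Nat.findGreatest_zero]

theorem kmp_loop (s : List (Option Int)) :
    ∀ n, 1 + n ≤ s.length →
      ((List.range' 1 n).foldl (kmpStep s) (List.replicate s.length 0, 0)).1.length = s.length ∧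
      (∀ j, j + 1 ≤ 1 + n →
        ((List.range' 1 n).foldl (kmpStep s) (List.replicate s.length 0, 0)).1.getD j 0 =
          piSpec (s.take (j + 1))) ∧
      ((List.range' 1 n).foldl (kmpStep s) (List.replicate s.length 0, 0)).2 =
        piSpec (s.take (1 + n)) := by
  intro n
  induction n with
  | zero =>
    intro _
    have hone : (s.take 1).length = 1 := by simp [List.length_take]; omega
    refine ⟨by simp, ?_, ?_⟩
    · intro j hj
      have hj0 : j = 0 := by omega
      subst hj0
      rw [piSpec_one _ hone]
      simp [List.getD_eq_getElem?_getD, List.getElem?_replicate]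
      split <;> rfl
    · simp [piSpec_one _ hone]
  | succ n ih =>
    intro hn
    obtain ⟨hlen, hpi, hk⟩ := ih (by omega)
    set st := (List.range' 1 n).foldl (kmpStep s) (List.replicate s.length 0, 0) with hst
    have hrange : List.range' 1 (n + 1) = List.range' 1 n ++ [1 + n] := by
      exact List.range'_1_concat
    rw [hrange, List.foldl_append]
    simp only [List.foldl_cons, List.foldl_nil]
    have hilt : 1 + n < s.length := by omega
    have hstep := kmp_step s st.1 (s.getD (1 + n) none) (1 + n) (by omega) (by omega)
      (fun j hj => hpi j hj)
    have htake : s.take (1 + n) ++ [s.getD (1 + n) none] = s.take (1 + n + 1) := by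
      rw [List.take_add_one (i := 1 + n), List.getElem?_eq_getElem hilt,
        List.getD_eq_getElem _ _ hilt, Option.toList_some]
    rw [htake] at hstep
    have hk2 : (kmpStep s st (1 + n)).2 = piSpec (s.take (1 + n + 1)) := by
      simp only [kmpStep, hk]
      exact hstep
    refine ⟨by simp only [kmpStep, List.length_set]; exact hlen, ?_, ?_⟩
    · intro j hj
      rcases Nat.lt_or_ge j (1 + n) with hlt | hge
      · have : (kmpStep s st (1 + n)).1.getD j 0 = st.1.getD j 0 := by
          simp only [kmpStep]
          simp [List.getD_eq_getElem?_getD, List.getElem?_set_ne (by omega : 1 + n ≠ j)]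
        rw [this]
        exact hpi j (by omega)
      · have hje : j = 1 + n := by omega
        rw [hje]
        have : (kmpStep s st (1 + n)).1.getD (1 + n) 0 = (kmpStep s st (1 + n)).2 := by
          simp only [kmpStep]
          simp [List.getD_eq_getElem?_getD, hlen, hilt]
        rw [this, hk2]
    · rw [show 1 + n + 1 = 1 + (n + 1) by omega] at hk2
      exact hk2

-- borders of output ++ [none] ++ prompt are exactly the overlaps
theorem border_iff_overlap (o p : List Int) (k : Nat) :
    borderb (o.map some ++ none :: p.map some) k = true ↔
      (k ≤ min o.length p.length ∧ ovb o p k = true) := by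
  set s : List (Option Int) := o.map some ++ none :: p.map some with hs
  have hslen : s.length = o.length + p.length + 1 := by simp [hs]; omega
  have hsO : ∀ m, (h : m < o.length) → s[m]? = some (some o[m]) := by
    intro m h
    rw [hs, List.getElem?_append_left (by simpa using h)]
    simp [List.getElem?_map, List.getElem?_eq_getElem h]
  have hsSep : s[o.length]? = some none := by
    rw [hs, List.getElem?_append_right (by simp)]
    simp
  have hsP : ∀ m, o.length < m → m < s.length → ∃ v, s[m]? = some (some v) := by
    intro m h1 h2
    rw [hs, List.getElem?_append_right (by simp; omega)]
    have : m - (o.map some).length = (m - o.length - 1) + 1 := by simp; omega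
    rw [this]
    simp only [List.getElem?_cons_succ]
    have hb : m - o.length - 1 < p.length := by simp [hs] at h2 ⊢; omega
    exact ⟨p[m - o.length - 1], by simp [List.getElem?_map, List.getElem?_eq_getElem hb]⟩
  have htk : k ≤ o.length → s.take k = (o.take k).map some := by
    intro hko
    rw [hs, List.take_append_of_le_length (by simpa using hko), List.map_take]
  have hdk : k ≤ p.length → s.drop (s.length - k) = (p.drop (p.length - k)).map some := by
    intro hkp
    have hre : s = (o.map some ++ [none]) ++ p.map some := by simp [hs]
    have harith : s.length - k = (o.map some ++ [none]).length + (p.length - k) := by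
      simp [hslen]; omega
    rw [hre] at harith ⊢
    rw [harith, List.drop_append]
    rw [List.drop_eq_nil_of_le (by simp)]
    simp [List.map_drop]
  constructor
  · intro hb
    obtain ⟨hk, heq⟩ := (borderb_iff _ _).mp hb
    have hkmin : k ≤ min o.length p.length := by
      by_contra hgt
      rcases Nat.lt_or_ge p.length k with hkp | hkp
      · -- k > |p|: position k - |p| - 1 is `some` in the prefix but the separator in the suffix
        have hidx : k - p.length - 1 < o.length := by omega
        have h1 := congrArg (fun l => l[k - p.length - 1]?) heq
        simp only [List.getElem?_take_of_lt (by omega : k - p.length - 1 < k),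
          List.getElem?_drop] at h1
        rw [hsO _ hidx, show s.length - k + (k - p.length - 1) = o.length by omega,
          hsSep] at h1
        simp at h1
      · -- |o| < k ≤ |p|: position |o| is the separator in the prefix but `some` in the suffix
        have hko : o.length < k := by omega
        have h1 := congrArg (fun l => l[o.length]?) heq
        simp only [List.getElem?_take_of_lt hko, List.getElem?_drop] at h1
        obtain ⟨v, hv⟩ := hsP (s.length - k + o.length) (by omega) (by omega)
        rw [hsSep, hv] at h1
        simp at h1
    refine ⟨hkmin, ?_⟩
    rw [htk (by omega), hdk (by omega)] at heq
    have := List.map_injective_iff.mpr (Option.some_injective Int) heq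
    simp [ovb, this]
  · rintro ⟨hkmin, hov⟩
    rw [borderb_iff]
    refine ⟨by omega, ?_⟩
    rw [htk (by omega), hdk (by omega)]
    have := of_decide_eq_true hov
    rw [this]

theorem piSpec_eq_maxOv (o p : List Int) :
    piSpec (o.map some ++ none :: p.map some) = maxOv o p := by
  have hnil : (o.map some ++ none :: p.map some : List (Option Int)) ≠ [] := by simp
  apply le_antisymm
  · obtain ⟨hmin, hov⟩ :=
      (border_iff_overlap o p _).mp (piSpec_border _ hnil)
    exact Nat.le_findGreatest hmin hov
  · have h0 : ovb o p 0 = true := by simp [ovb]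
    have hov : ovb o p (maxOv o p) = true := by
      unfold maxOv
      exact Nat.findGreatest_spec (P := fun k => ovb o p k = true) (Nat.zero_le _) h0
    have hle : maxOv o p ≤ min o.length p.length := Nat.findGreatest_le _
    exact le_piSpec _ _ ((border_iff_overlap o p _).mpr ⟨hle, hov⟩)

-- A's loop returns o.drop of the greatest overlap
theorem stripLoopA_spec (o p : List Int) :
    ∀ m : Nat, m ≤ min o.length p.length →
      stripLoopA o p (PySem.List.pyRange (m : Int) 0 (-1)) =
        o.drop (Nat.findGreatest (fun k => ovb o p k = true) m) := by
  intro m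
  induction m with
  | zero =>
    intro _
    rw [PySem.List.pyRange_neg_one_eq_nil (by norm_num)]
    simp [stripLoopA, Nat.findGreatest_zero]
  | succ m ih =>
    intro hm
    rw [PySem.List.pyRange_neg_one_cons (by exact_mod_cast Nat.succ_pos m)]
    rw [show ((m + 1 : Nat) : Int) - 1 = (m : Int) by push_cast; ring]
    rw [stripLoopA]
    rw [PySem.List.slice_from_neg_natCast p (m + 1) (Nat.succ_pos m),
      PySem.List.slice_to_natCast o (m + 1)]
    rw [Nat.findGreatest_succ]
    by_cases hc : p.drop (p.length - (m + 1)) = o.take (m + 1)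
    · rw [if_pos hc]
      have hov : ovb o p (m + 1) = true := by simp [ovb, hc]
      rw [if_pos hov]
      exact PySem.List.slice_from_natCast o (m + 1)
    · rw [if_neg hc]
      have hov : ¬ (ovb o p (m + 1) = true) := by simp [ovb]; exact fun h => hc h.symm
      rw [if_neg hov]
      exact ih (by omega)

-- ===== VERDICT (by name: the statement is the Claim_ definition above) =====
theorem drop_eq_common (o p : List Int) (ho : o ≠ []) (hp : p ≠ []) :
    strip_prompt_overlap_py o p = o.drop (maxOv o p) := by
  unfold strip_prompt_overlap_py
  rw [if_neg (by simp [ho, hp])]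
  have hcast : (min (o.length : Int) (p.length : Int)) = ((min o.length p.length : Nat) : Int) := by
    simp [Nat.cast_min]
  simp only [hcast]
  rw [stripLoopA_spec o p (min o.length p.length) le_rfl]
  rfl

theorem alt_eq_common (o p : List Int) (ho : o ≠ []) (hp : p ≠ []) :
    strip_prompt_overlap_py_alt o p = o.drop (maxOv o p) := by
  unfold strip_prompt_overlap_py_alt
  rw [if_neg (by simp [ho, hp])]
  set s : List (Option Int) := o.map some ++ none :: p.map some with hs
  have hslen : s.length = o.length + p.length + 1 := by simp [hs]; omega
  obtain ⟨-, -, hk⟩ := kmp_loop s (s.length - 1) (by omega)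
  simp only [hk]
  rw [show 1 + (s.length - 1) = s.length by omega, List.take_length]
  rw [piSpec_eq_maxOv o p]

theorem strip_prompt_overlap_py_spec : Claim_equal_strip_prompt_overlap_py := by
  intro o p _
  unfold Spec_strip_prompt_overlap_py
  by_cases ho : o = []
  · unfold strip_prompt_overlap_py strip_prompt_overlap_py_alt
    rw [if_pos (Or.inl ho), if_pos (Or.inl ho)]
  by_cases hp : p = []
  · unfold strip_prompt_overlap_py strip_prompt_overlap_py_alt
    rw [if_pos (Or.inr hp), if_pos (Or.inr hp)]
  rw [drop_eq_common o p ho hp, alt_eq_common o p ho hp]
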